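-- pv_equiv track=rewrite | github.com/jimxzai/asicForTranAI | 2025-3.5bit-groq-mvp/api/inference_api.py | calculate_percentile
-- ===== SOURCE A (Python) =====
-- def calculate_percentile(fq_score: int) -> int:
--     """
--     Calculate percentile ranking based on score distribution
--     """
--     # Simplified percentile calculation
--     # Real version would use actual user distribution
--     percentile_map = [
--         (300, 10), (400, 25), (500, 40), (600, 55),
--         (700, 70), (800, 85), (900, 95), (1000, 99)
--     ]
--
--     for threshold, percentile in percentile_map:
--         if fq_score <= threshold:
--             return percentile
--
--     return 99
-- ===== SOURCE B (Python) =====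
-- def calculate_percentile(fq_score: int) -> int:
--     # Closed-form: index = clamped ceiling of (fq_score - 300)/100, then table lookup.
--     percentiles = [10, 25, 40, 55, 70, 85, 95, 99]
--     idx = max(0, -(-(fq_score - 300) // 100))
--     return percentiles[idx] if idx < len(percentiles) else 99
-- ===== Notes on version B (the rewrite author's own statement) =====
-- stated objective: alternative
-- what changed: Replaces the linear scan over the (threshold, percentile) table with a closed-form arithmetic index (clamped ceiling division of fq_score-300 by 100) into a percentile list.
import Mathlib
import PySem

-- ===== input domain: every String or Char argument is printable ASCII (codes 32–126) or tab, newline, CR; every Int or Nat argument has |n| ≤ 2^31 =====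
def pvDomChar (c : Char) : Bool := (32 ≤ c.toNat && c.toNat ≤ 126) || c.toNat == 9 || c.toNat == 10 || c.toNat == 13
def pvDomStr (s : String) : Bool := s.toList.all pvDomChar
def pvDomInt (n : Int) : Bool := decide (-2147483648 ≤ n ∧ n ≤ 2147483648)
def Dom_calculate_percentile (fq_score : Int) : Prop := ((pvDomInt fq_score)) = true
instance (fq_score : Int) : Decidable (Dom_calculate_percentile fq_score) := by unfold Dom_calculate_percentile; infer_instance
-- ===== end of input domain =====

-- B replaces A's linear table scan with a closed-form arithmetic index into the percentile list (alternative structure, same cost class).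


-- ===== PORT A =====
def pyLoopA (fq_score : Int) : List (Int × Int) → Int
  | [] => 99
  | (threshold, percentile) :: rest =>
      if fq_score ≤ threshold then percentile else pyLoopA fq_score rest

def calculate_percentile (fq_score : Int) : Int :=
  let percentile_map : List (Int × Int) :=
    [(300, 10), (400, 25), (500, 40), (600, 55),
     (700, 70), (800, 85), (900, 95), (1000, 99)]
  pyLoopA fq_score percentile_map

-- ===== PORT B =====
def calculate_percentile_alt (fq_score : Int) : Int :=
  let percentiles : List Int := [10, 25, 40, 55, 70, 85, 95, 99]
  let idx : Int := max 0 (-(PySem.Int.floordiv (-(fq_score - 300)) 100))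
  if idx < (percentiles.length : Int) then (PySem.List.pyGet? percentiles idx).getD 99 else 99

-- ===== PRECONDITION & SPEC =====
def Spec_calculate_percentile (fq_score : Int) (out : Int) : Prop := out = calculate_percentile_alt fq_score
instance (fq_score : Int) (out : Int) : Decidable (Spec_calculate_percentile fq_score out) := by unfold Spec_calculate_percentile; infer_instance

-- ===== CLAIM (what is proved, stated in full; the proofs are below) =====
def Claim_equal_calculate_percentile : Prop := ∀ (fq_score : Int), Dom_calculate_percentile fq_score → Spec_calculate_percentile fq_score (calculate_percentile fq_score)

-- ===== LEMMAS AND PROOFS =====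

-- ===== VERDICT (by name: the statement is the Claim_ definition above) =====
theorem calculate_percentile_spec : Claim_equal_calculate_percentile := by
  intro s _
  unfold Spec_calculate_percentile calculate_percentile calculate_percentile_alt pyLoopA
  have hq : PySem.Int.floordiv (-(s - 300)) 100 = (300 - s) / 100 := by
    rw [PySem.Int.floordiv_eq_ediv_of_pos (by norm_num)]; ring_nf
  rw [hq]
  by_cases h1 : s ≤ 300
  · have hmx : max 0 (-((300 - s) / 100)) = 0 := by omega
    rw [hmx]; simp only [pyLoopA, if_pos h1]; decide
  · by_cases h2 : s ≤ 400
    · have hmx : max 0 (-((300 - s) / 100)) = 1 := by omega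
      rw [hmx]; simp only [pyLoopA, if_neg h1, if_pos h2]; decide
    · by_cases h3 : s ≤ 500
      · have hmx : max 0 (-((300 - s) / 100)) = 2 := by omega
        rw [hmx]; simp only [pyLoopA, if_neg h1, if_neg h2, if_pos h3]; decide
      · by_cases h4 : s ≤ 600
        · have hmx : max 0 (-((300 - s) / 100)) = 3 := by omega
          rw [hmx]; simp only [pyLoopA, if_neg h1, if_neg h2, if_neg h3, if_pos h4]; decide
        · by_cases h5 : s ≤ 700
          · have hmx : max 0 (-((300 - s) / 100)) = 4 := by omega
            rw [hmx]; simp only [pyLoopA, if_neg h1, if_neg h2, if_neg h3, if_neg h4, if_pos h5]; decide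
          · by_cases h6 : s ≤ 800
            · have hmx : max 0 (-((300 - s) / 100)) = 5 := by omega
              rw [hmx]; simp only [pyLoopA, if_neg h1, if_neg h2, if_neg h3, if_neg h4, if_neg h5, if_pos h6]; decide
            · by_cases h7 : s ≤ 900
              · have hmx : max 0 (-((300 - s) / 100)) = 6 := by omega
                rw [hmx]; simp only [pyLoopA, if_neg h1, if_neg h2, if_neg h3, if_neg h4, if_neg h5, if_neg h6, if_pos h7]; decide
              · by_cases h8 : s ≤ 1000
                · have hmx : max 0 (-((300 - s) / 100)) = 7 := by omega
                  rw [hmx]; simp only [pyLoopA, if_neg h1, if_neg h2, if_neg h3, if_neg h4, if_neg h5, if_neg h6, if_neg h7, if_pos h8]; decide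
                · have hcond : (max 0 (-((300 - s) / 100)) < (([10, 25, 40, 55, 70, 85, 95, 99] : List Int).length : Int)) = False := by
                    simp only [List.length_cons, List.length_nil, eq_iff_iff, iff_false]; push_cast; omega
                  simp only [pyLoopA, if_neg h1, if_neg h2, if_neg h3, if_neg h4, if_neg h5, if_neg h6, if_neg h7, if_neg h8, hcond, if_false]
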